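-- pv_equiv track=rewrite | github.com/hw146/MedCPI | scripts/sapbert_map_mentions.py | medication_token_set
-- ===== SOURCE A (Python) =====
-- MEDICATION_TOKEN_STOPWORDS = {
--     "bag",
--     "cap",
--     "capsule",
--     "cream",
--     "gel",
--     "inj",
--     "injectable",
--     "injection",
--     "kit",
--     "needle",
--     "oral",
--     "pen",
--     "powder",
--     "solution",
--     "soln",
--     "susp",
--     "suspension",
--     "syringe",
--     "tab",
--     "tablet",
--     "topical",
--     "ultra",
--     "fine",
-- }
--
-- def normalize_text(text: str) -> str:
--     text = text.lower().strip()
--     cleaned = []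
--     prev_space = False
--     for ch in text:
--         if ch.isalnum():
--             cleaned.append(ch)
--             prev_space = False
--         else:
--             if not prev_space:
--                 cleaned.append(" ")
--                 prev_space = True
--     return "".join(cleaned).strip()
--
-- def normalized_tokens(text: str | None) -> list[str]:
--     normalized = normalize_text(text or "")
--     return [token for token in normalized.split() if token]
--
-- def medication_token_set(text: str | None) -> set[str]:
--     tokens = set()
--     for token in normalized_tokens(text):
--         if len(token) <= 2:
--             continue
--         if token in MEDICATION_TOKEN_STOPWORDS:
--             continue
--         tokens.add(token)
--     return tokens
-- ===== SOURCE B (Python) =====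
-- MEDICATION_TOKEN_STOPWORDS = {
--     "bag", "cap", "capsule", "cream", "gel", "inj", "injectable", "injection",
--     "kit", "needle", "oral", "pen", "powder", "solution", "soln", "susp",
--     "suspension", "syringe", "tab", "tablet", "topical", "ultra", "fine",
-- }
--
--
-- def medication_token_set(text):
--     tokens = set()
--     buf = ""
--     for ch in (text or "").lower():
--         if ch.isalnum():
--             buf += ch
--         else:
--             if len(buf) > 2 and buf not in MEDICATION_TOKEN_STOPWORDS:
--                 tokens.add(buf)
--             buf = ""
--     if len(buf) > 2 and buf not in MEDICATION_TOKEN_STOPWORDS: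
--         tokens.add(buf)
--     return tokens
-- ===== Notes on version B (the rewrite author's own statement) =====
-- stated objective: simpler
-- what changed: Replaces the three-stage pipeline (build a space-normalized intermediate string, split it, filter the split tokens) by one direct character scan that buffers alphanumeric runs and flushes each maximal run through the length/stopword test.
import Mathlib
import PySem

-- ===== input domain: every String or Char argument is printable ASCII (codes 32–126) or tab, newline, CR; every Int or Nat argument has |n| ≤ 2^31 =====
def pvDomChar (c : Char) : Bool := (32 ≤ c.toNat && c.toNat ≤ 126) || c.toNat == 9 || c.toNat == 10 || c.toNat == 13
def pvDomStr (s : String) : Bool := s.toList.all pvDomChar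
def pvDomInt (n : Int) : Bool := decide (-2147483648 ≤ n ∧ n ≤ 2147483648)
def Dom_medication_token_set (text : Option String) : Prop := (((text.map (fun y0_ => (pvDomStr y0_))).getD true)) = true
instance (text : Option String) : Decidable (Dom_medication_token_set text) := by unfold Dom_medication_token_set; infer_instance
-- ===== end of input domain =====

-- B replaces A's three-stage pipeline (build a space-normalized string, split it, filter the tokens)
-- by one direct character scan that buffers alphanumeric runs and flushes each run through the
-- length/stopword test (objective: simpler).

-- ===== PORT A =====
-- module constant MEDICATION_TOKEN_STOPWORDS (a set literal; both Pythons reference it)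
def pvStopwords : PySem.Set String := PySem.Set.ofList
  ["bag", "cap", "capsule", "cream", "gel", "inj", "injectable", "injection",
   "kit", "needle", "oral", "pen", "powder", "solution", "soln", "susp",
   "suspension", "syringe", "tab", "tablet", "topical", "ultra", "fine"]

def normalize_text (text : String) : String :=
  let t := PySem.Str.strip (PySem.Str.lower text)
  -- for ch in text: cleaned.append(…) with the prev_space flag, as a fold over (cleaned, prev_space)
  let st := t.toList.foldl (fun (st : List Char × Bool) ch =>
      if PySem.Chars.isalnum ch then (st.1 ++ [ch], false)
      else if !st.2 then (st.1 ++ [' '], true) else st) ([], false)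
  -- "".join(cleaned) of a list of 1-char strings = the string of those chars
  PySem.Str.strip (String.ofList st.1)

def normalized_tokens (text : Option String) : List String :=
  let normalized := normalize_text (text.getD "")
  (PySem.Str.split₀ normalized).filter (fun token => token ≠ "")

def medication_token_set (text : Option String) : List String :=
  (normalized_tokens text).foldl (fun tokens token =>
    if PySem.Str.len token ≤ 2 then tokens
    else if PySem.Set.contains pvStopwords token then tokens
    else PySem.Set.add tokens token) []

-- ===== PORT B =====
-- the flush of B's buffer (the repeated 'if len(buf) > 2 and buf not in …: tokens.add(buf)')
def pvFlush (tokens : PySem.Set String) (buf : List Char) : PySem.Set String :=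
  if 2 < buf.length && !(PySem.Set.contains pvStopwords (String.ofList buf)) then
    PySem.Set.add tokens (String.ofList buf)
  else tokens

def medication_token_set_alt (text : Option String) : List String :=
  -- buf is a Python str built by 'buf += ch'; ported as the List Char behind the string
  let st := ((PySem.Str.lower (text.getD "")).toList).foldl
      (fun (st : PySem.Set String × List Char) ch =>
        if PySem.Chars.isalnum ch then (st.1, st.2 ++ [ch]) else (pvFlush st.1 st.2, [])) ([], [])
  pvFlush st.1 st.2

-- ===== PRECONDITION & SPEC =====
def Spec_medication_token_set (text : Option String) (out : List String) : Prop := out = medication_token_set_alt text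
instance (text : Option String) (out : List String) : Decidable (Spec_medication_token_set text out) := by unfold Spec_medication_token_set; infer_instance

-- ===== CLAIM (what is proved, stated in full; the proofs are below) =====
def Claim_equal_medication_token_set : Prop := ∀ (text : Option String), Dom_medication_token_set text → Spec_medication_token_set text (medication_token_set text)

-- ===== LEMMAS AND PROOFS =====

-- the separator predicate of both token scans: "not alphanumeric"
def pvSep (c : Char) : Bool := !(PySem.Chars.isalnum c)
-- keep the nonempty chunks of a splitOnP decomposition
def pvFNE (L : List (List Char)) : List (List Char) := L.filter (fun t => !t.isEmpty)

theorem pv_space_not_alnum (c : Char) (h : PySem.Chars.isspace c = true) :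
    PySem.Chars.isalnum c = false := by
  have hA : ('A'.val).toNat = 65 := by decide
  have hZ : ('Z'.val).toNat = 90 := by decide
  have ha : ('a'.val).toNat = 97 := by decide
  have hz : ('z'.val).toNat = 122 := by decide
  have h0 : ('0'.val).toNat = 48 := by decide
  have h9 : ('9'.val).toNat = 57 := by decide
  simp only [PySem.Chars.isspace, PySem.Chars.isalnum, PySem.Chars.isalpha, PySem.Chars.isdigit,
    PySem.Chars.isupper, PySem.Chars.islower, Bool.or_eq_true, Bool.and_eq_true, decide_eq_true_eq,
    Bool.or_eq_false_iff, Bool.and_eq_false_iff, decide_eq_false_iff_not, Char.le_def, Char.toNat,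
    UInt32.le_iff_toNat_le, hA, hZ, ha, hz, h0, h9] at *
  omega

theorem pv_go_spec (s : List Char) : ∀ cur acc, PySem.Chars.split₀.go s cur acc =
    acc.reverse ++ pvFNE ((List.splitOnP PySem.Chars.isspace s).modifyHead (fun t => cur.reverse ++ t)) := by
  induction s with
  | nil =>
    intro cur acc
    simp only [PySem.Chars.split₀.go, List.splitOnP_nil, List.modifyHead_cons, pvFNE]
    by_cases hc : cur = []
    · subst hc; simp
    · simp [hc, List.isEmpty_iff]
  | cons c rest ih =>
    intro cur acc
    by_cases hc : PySem.Chars.isspace c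
    · rw [show PySem.Chars.split₀.go (c :: rest) cur acc =
          (if cur.isEmpty then PySem.Chars.split₀.go rest [] acc
           else PySem.Chars.split₀.go rest [] (cur.reverse :: acc)) from by simp [PySem.Chars.split₀.go, hc],
        List.splitOnP_cons]
      simp only [hc, if_true, List.modifyHead_cons]
      by_cases hcur : cur = []
      · subst hcur
        simp only [List.isEmpty_nil, if_true, ih, pvFNE, List.filter_cons, List.reverse_nil,
          List.nil_append]
        rw [show (fun t : List Char => t) = id from rfl, List.modifyHead_id]
        simp
      · rw [if_neg (by simp [hcur]), ih]
        simp only [pvFNE, List.filter_cons, List.reverse_nil, List.nil_append, List.append_nil,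
          List.reverse_cons, List.append_assoc, List.singleton_append]
        rw [show (fun t : List Char => t) = id from rfl, List.modifyHead_id]
        simp [hcur, List.isEmpty_iff]
    · rw [show PySem.Chars.split₀.go (c :: rest) cur acc =
          PySem.Chars.split₀.go rest (c :: cur) acc from by simp [PySem.Chars.split₀.go, hc],
        List.splitOnP_cons, ih]
      rw [if_neg (by simp [hc]), List.modifyHead_modifyHead]
      congr 2
      congr 1
      funext t
      simp

theorem pv_split₀_eq (s : List Char) :
    PySem.Chars.split₀ s = pvFNE (List.splitOnP PySem.Chars.isspace s) := by
  show PySem.Chars.split₀.go s [] [] = _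
  rw [pv_go_spec]
  simp only [List.reverse_nil, List.nil_append]
  rw [show (fun t : List Char => t) = id from rfl, List.modifyHead_id]
  rfl

def aclean : List Char → Bool → List Char
  | [], _ => []
  | c :: cs, p =>
    if PySem.Chars.isalnum c then c :: aclean cs false
    else if !p then ' ' :: aclean cs true else aclean cs p

theorem pv_foldl_aclean (cs : List Char) : ∀ acc p,
    (cs.foldl (fun (st : List Char × Bool) ch =>
      if PySem.Chars.isalnum ch then (st.1 ++ [ch], false)
      else if !st.2 then (st.1 ++ [' '], true) else st) (acc, p)).1 = acc ++ aclean cs p := by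
  induction cs with
  | nil => intro acc p; simp [aclean]
  | cons c cs ih =>
    intro acc p
    rw [List.foldl_cons]
    by_cases hc : PySem.Chars.isalnum c
    · dsimp only
      rw [if_pos hc, ih]
      simp [aclean, hc]
    · dsimp only
      rw [if_neg hc]
      by_cases hp : p
      · subst hp
        rw [show (!true) = false from rfl, if_neg (by simp), ih]
        simp [aclean, hc]
      · simp only [Bool.not_eq_true] at hp
        subst hp
        rw [show (!false) = true from rfl, if_pos rfl, ih]
        simp [aclean, hc]

theorem pv_aclean_false (cs : List Char) :
    aclean cs false = if !cs.isEmpty && pvSep (cs.headD 'x') then ' ' :: aclean cs true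
                      else aclean cs true := by
  cases cs with
  | nil => simp [aclean]
  | cons c cs =>
    by_cases hc : PySem.Chars.isalnum c
    · simp [aclean, hc, pvSep]
    · simp [aclean, hc, pvSep]

theorem pv_splitOnP_congr (p q : Char → Bool) (x : List Char) (h : ∀ c ∈ x, p c = q c) :
    List.splitOnP p x = List.splitOnP q x := by
  induction x with
  | nil => simp
  | cons c cs ih =>
    rw [List.splitOnP_cons, List.splitOnP_cons, h c (by simp),
      ih (fun d hd => h d (by simp [hd]))]

theorem pv_aclean_mem (cs : List Char) : ∀ p c, c ∈ aclean cs p →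
    PySem.Chars.isalnum c = true ∨ c = ' ' := by
  induction cs with
  | nil => simp [aclean]
  | cons d ds ih =>
    intro p c hc
    by_cases hd : PySem.Chars.isalnum d
    · rw [aclean, if_pos hd] at hc
      rcases List.mem_cons.1 hc with h | h
      · exact Or.inl (h ▸ hd)
      · exact ih _ _ h
    · rw [aclean, if_neg hd] at hc
      by_cases hp : p
      · simp only [hp] at hc; exact ih _ _ hc
      · simp only [hp] at hc
        rcases List.mem_cons.1 hc with h | h
        · exact Or.inr h
        · exact ih _ _ h

theorem pv_splitOnP_snoc (q : Char → Bool) (c : Char) (h : q c = true) (x : List Char) :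
    List.splitOnP q (x ++ [c]) = List.splitOnP q x ++ [[]] := by
  induction x with
  | nil => simp [List.splitOnP_cons, h]
  | cons a x ih =>
    rw [List.cons_append, List.splitOnP_cons, List.splitOnP_cons, ih]
    by_cases ha : q a
    · simp [ha]
    · rcases hsp : List.splitOnP q x with _ | ⟨hd, tl⟩
      · exact absurd hsp (List.splitOnP_ne_nil q x)
      · simp [ha]

theorem pv_FNE_dropWhile (q w : Char → Bool) (h : ∀ c, w c = true → q c = true) (x : List Char) :
    pvFNE (List.splitOnP q (List.dropWhile w x)) = pvFNE (List.splitOnP q x) := by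
  induction x with
  | nil => simp
  | cons c cs ih =>
    by_cases hc : w c
    · rw [List.dropWhile_cons_of_pos hc, ih, List.splitOnP_cons, if_pos (h c hc)]
      simp [pvFNE]
    · rw [List.dropWhile_cons_of_neg (by simp [hc])]

theorem pv_FNE_rdrop (q w : Char → Bool) (h : ∀ c, w c = true → q c = true) (r : List Char) :
    pvFNE (List.splitOnP q ((List.dropWhile w r).reverse)) = pvFNE (List.splitOnP q r.reverse) := by
  induction r with
  | nil => simp
  | cons c rr ih =>
    by_cases hc : w c
    · rw [List.dropWhile_cons_of_pos hc, ih, List.reverse_cons,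
        pv_splitOnP_snoc q c (h c hc)]
      simp [pvFNE]
    · rw [List.dropWhile_cons_of_neg (by simp [hc])]

theorem pv_FNE_strip (q : Char → Bool) (h : ∀ c, PySem.Chars.isspace c = true → q c = true)
    (x : List Char) :
    pvFNE (List.splitOnP q (PySem.Chars.strip x)) = pvFNE (List.splitOnP q x) := by
  show pvFNE (List.splitOnP q (PySem.Chars.rstrip (PySem.Chars.lstrip x))) = _
  have h1 := pv_FNE_rdrop q PySem.Chars.isspace h ((PySem.Chars.lstrip x).reverse)
  rw [List.reverse_reverse] at h1
  rw [show PySem.Chars.rstrip (PySem.Chars.lstrip x)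
      = (List.dropWhile PySem.Chars.isspace (PySem.Chars.lstrip x).reverse).reverse from rfl, h1]
  exact pv_FNE_dropWhile q PySem.Chars.isspace h x

def pvE (cs : List Char) : Bool := cs.isEmpty || pvSep (cs.getLastD 'x')

theorem pv_aclean_true (cs : List Char) :
    List.splitOnP pvSep (aclean cs true) =
      pvFNE (List.splitOnP pvSep cs) ++ (if pvE cs then [[]] else []) := by
  induction cs with
  | nil => simp [aclean, pvE, pvFNE]
  | cons c cs ih =>
    by_cases hc : PySem.Chars.isalnum c
    · rw [show aclean (c :: cs) true = c :: aclean cs false from by simp [aclean, hc]]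
      cases cs with
      | nil =>
        simp [aclean, List.splitOnP_cons, pvSep, hc, pvE, pvFNE]
      | cons d ds =>
        rw [pv_aclean_false]
        by_cases hd : PySem.Chars.isalnum d
        · rw [if_neg (by simp [pvSep, hd])]
          rcases hsp : List.splitOnP pvSep ds with _ | ⟨h, t⟩
          · exact absurd hsp (List.splitOnP_ne_nil pvSep ds)
          have hL : List.splitOnP pvSep (c :: aclean (d :: ds) true)
              = List.modifyHead (List.cons c)
                  (pvFNE (List.splitOnP pvSep (d :: ds)) ++ if pvE (d :: ds) = true then [[]] else []) := by
            rw [List.splitOnP_cons, if_neg (by simp [pvSep, hc]), ih]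
          have hds : List.splitOnP pvSep (d :: ds) = (d :: h) :: t := by
            rw [List.splitOnP_cons, if_neg (by simp [pvSep, hd]), hsp, List.modifyHead_cons]
          have hR : List.splitOnP pvSep (c :: d :: ds) = (c :: d :: h) :: t := by
            rw [List.splitOnP_cons, if_neg (by simp [pvSep, hc]), hds, List.modifyHead_cons]
          rw [hL, hds, hR, show pvE (c :: d :: ds) = pvE (d :: ds) from by
            simp [pvE, List.getLastD_cons]]
          simp only [pvFNE, List.filter_cons, List.isEmpty_cons, Bool.not_false]
          by_cases hE : pvE (d :: ds) <;> simp [hE]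
        · rw [if_pos (by simp [pvSep, hd])]
          have hL : List.splitOnP pvSep (c :: ' ' :: aclean (d :: ds) true)
              = [c] :: (pvFNE (List.splitOnP pvSep (d :: ds)) ++ if pvE (d :: ds) = true then [[]] else []) := by
            rw [List.splitOnP_cons, if_neg (by simp [pvSep, hc]), List.splitOnP_cons,
              if_pos (by decide), ih, List.modifyHead_cons]
          have hR : List.splitOnP pvSep (c :: d :: ds) = [c] :: List.splitOnP pvSep ds := by
            rw [List.splitOnP_cons, if_neg (by simp [pvSep, hc]), List.splitOnP_cons,
              if_pos (by simp [pvSep, hd]), List.modifyHead_cons]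
          have hmid : pvFNE (List.splitOnP pvSep (d :: ds)) = pvFNE (List.splitOnP pvSep ds) := by
            rw [List.splitOnP_cons, if_pos (by simp [pvSep, hd])]
            simp [pvFNE]
          rw [hL, hR, hmid, show pvE (c :: d :: ds) = pvE (d :: ds) from by
            simp [pvE, List.getLastD_cons]]
          simp [pvFNE]
    · rw [show aclean (c :: cs) true = aclean cs true from by simp [aclean, hc], ih,
        List.splitOnP_cons, if_pos (show pvSep c = true by simp [pvSep, hc])]
      have he : pvE (c :: cs) = pvE cs := by
        cases cs with
        | nil => simp [pvE, pvSep, hc]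
        | cons d ds => simp [pvE, List.getLastD_cons]
      rw [he]
      simp [pvFNE]

theorem pv_aclean_false_FNE (cs : List Char) :
    pvFNE (List.splitOnP pvSep (aclean cs false)) = pvFNE (List.splitOnP pvSep cs) := by
  rw [pv_aclean_false]
  by_cases hh : !cs.isEmpty && pvSep (cs.headD 'x')
  · rw [if_pos hh, List.splitOnP_cons, if_pos (show pvSep ' ' = true by decide), pv_aclean_true]
    simp only [pvFNE, List.filter_cons, List.isEmpty_nil, Bool.not_true, List.filter_append,
      List.filter_filter]
    by_cases hE : pvE cs <;> simp [hE, pvFNE, List.filter_filter]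
  · rw [if_neg hh, pv_aclean_true]
    simp only [pvFNE, List.filter_append, List.filter_filter]
    by_cases hE : pvE cs <;> simp [hE, pvFNE, List.filter_filter]

def bscan : List String → List Char → List Char → List String
  | res, buf, [] => pvFlush res buf
  | res, buf, c :: cs =>
    if PySem.Chars.isalnum c then bscan res (buf ++ [c]) cs else bscan (pvFlush res buf) [] cs

theorem pv_foldl_bscan (cs : List Char) : ∀ res buf,
    pvFlush
      (cs.foldl (fun (st : PySem.Set String × List Char) ch =>
        if PySem.Chars.isalnum ch then (st.1, st.2 ++ [ch]) else (pvFlush st.1 st.2, []))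
        (res, buf)).1
      (cs.foldl (fun (st : PySem.Set String × List Char) ch =>
        if PySem.Chars.isalnum ch then (st.1, st.2 ++ [ch]) else (pvFlush st.1 st.2, []))
        (res, buf)).2 = bscan res buf cs := by
  induction cs with
  | nil => intro res buf; simp [bscan]
  | cons c cs ih =>
    intro res buf
    rw [List.foldl_cons]
    by_cases hc : PySem.Chars.isalnum c
    · dsimp only
      rw [if_pos hc, bscan, if_pos hc]
      exact ih res (buf ++ [c])
    · dsimp only
      rw [if_neg hc, bscan, if_neg hc]
      exact ih (pvFlush res buf) []

theorem pv_bscan_eq (cs : List Char) : ∀ res buf, bscan res buf cs =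
    List.foldl pvFlush res ((List.splitOnP pvSep cs).modifyHead (fun t => buf ++ t)) := by
  induction cs with
  | nil => intro res buf; simp [bscan]
  | cons c cs ih =>
    intro res buf
    by_cases hc : PySem.Chars.isalnum c
    · rw [bscan, if_pos hc, ih, List.splitOnP_cons, if_neg (by simp [pvSep, hc]),
        List.modifyHead_modifyHead]
      rcases hsp : List.splitOnP pvSep cs with _ | ⟨h, t⟩
      · exact absurd hsp (List.splitOnP_ne_nil pvSep cs)
      · simp
    · rw [bscan, if_neg hc, ih, List.splitOnP_cons, if_pos (show pvSep c = true by simp [pvSep, hc]),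
        List.modifyHead_cons]
      rcases hsp : List.splitOnP pvSep cs with _ | ⟨h, t⟩
      · exact absurd hsp (List.splitOnP_ne_nil pvSep cs)
      · simp

theorem pv_foldl_flush_FNE (L : List (List Char)) : ∀ res,
    List.foldl pvFlush res L = List.foldl pvFlush res (pvFNE L) := by
  induction L with
  | nil => intro res; simp [pvFNE]
  | cons h t ih =>
    intro res
    by_cases hh : h.isEmpty
    · rw [List.isEmpty_iff] at hh
      subst hh
      rw [List.foldl_cons, show pvFlush res [] = res from by simp [pvFlush], ih]
      simp [pvFNE]
    · rw [List.foldl_cons, ih]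
      simp [pvFNE, List.filter_cons, hh]

theorem pv_fold_tokens (chunks : List (List Char)) : ∀ r,
    List.foldl (fun tokens token =>
      if PySem.Str.len token ≤ 2 then tokens
      else if PySem.Set.contains pvStopwords token then tokens
      else PySem.Set.add tokens token) r (chunks.map String.ofList) =
    List.foldl pvFlush r chunks := by
  induction chunks with
  | nil => intro r; simp
  | cons h t ih =>
    intro r
    rw [List.map_cons, List.foldl_cons, List.foldl_cons, ih]
    congr 1
    dsimp only
    rw [show PySem.Str.len (String.ofList h) = (h.length : Int) from by
      simp [PySem.Str.len, String.toList_ofList]]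
    by_cases h2 : 2 < h.length
    · by_cases hstop : PySem.Set.contains pvStopwords (String.ofList h) = true
      · rw [if_neg (show ¬ ((h.length : Int) ≤ 2) by omega), if_pos hstop, pvFlush,
          if_neg (by simp only [hstop, Bool.not_true, Bool.and_false]; simp)]
      · have hstop' : PySem.Set.contains pvStopwords (String.ofList h) = false := by
          simpa using hstop
        rw [if_neg (show ¬ ((h.length : Int) ≤ 2) by omega), if_neg hstop, pvFlush,
          if_pos (by simp only [hstop', Bool.not_false, Bool.and_true]; simp [h2])]
    · rw [if_pos (show (h.length : Int) ≤ 2 by omega), pvFlush,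
        if_neg (by simp only [Bool.and_eq_true, decide_eq_true_eq]; rintro ⟨hx, -⟩; omega)]

theorem pv_normalize (s : String) : (normalize_text s).toList =
    PySem.Chars.strip (aclean ((PySem.Str.strip (PySem.Str.lower s)).toList) false) := by
  simp only [normalize_text, PySem.Str.toList_strip, String.toList_ofList, pv_foldl_aclean,
    List.nil_append]

theorem pv_tokens_eq (text : Option String) : normalized_tokens text =
    List.map String.ofList
      (pvFNE (List.splitOnP PySem.Chars.isspace (normalize_text (text.getD "")).toList)) := by
  unfold normalized_tokens
  dsimp only
  rw [show PySem.Str.split₀ (normalize_text (text.getD ""))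
      = List.map String.ofList (PySem.Chars.split₀ (normalize_text (text.getD "")).toList) from rfl,
    pv_split₀_eq]
  apply List.filter_eq_self.mpr
  intro tok htok
  rcases List.mem_map.1 htok with ⟨h, hh, rfl⟩
  have : ¬h.isEmpty := by
    have := List.of_mem_filter hh
    simpa using this
  simp only [decide_eq_true_eq]
  intro hcon
  apply this
  rw [show h = (String.ofList h).toList from (String.toList_ofList).symm, hcon]
  rfl

theorem pv_main (text : Option String) :
    medication_token_set text = medication_token_set_alt text := by
  unfold medication_token_set medication_token_set_alt
  rw [pv_tokens_eq, pv_fold_tokens, pv_normalize, pv_foldl_bscan, pv_bscan_eq]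
  rw [show (fun t : List Char => [] ++ t) = id from funext fun t => by simp, List.modifyHead_id, id]
  rw [pv_FNE_strip PySem.Chars.isspace (fun c hc => hc)]
  rw [pv_splitOnP_congr PySem.Chars.isspace pvSep _ (fun c hc => by
    rcases pv_aclean_mem _ _ _ hc with h | h
    · have hs : PySem.Chars.isspace c = false := by
        cases hs : PySem.Chars.isspace c
        · rfl
        · exact absurd (pv_space_not_alnum c hs) (by simp [h])
      rw [hs, pvSep, h]
      rfl
    · subst h; decide)]
  rw [pv_aclean_false_FNE]
  rw [show (PySem.Str.strip (PySem.Str.lower (text.getD ""))).toList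
      = PySem.Chars.strip (PySem.Chars.lower (text.getD "").toList) from by
    simp [PySem.Str.toList_strip, PySem.Str.toList_lower]]
  rw [pv_FNE_strip pvSep (fun c hc => by simp [pvSep, pv_space_not_alnum c hc])]
  rw [show (PySem.Str.lower (text.getD "")).toList
      = PySem.Chars.lower (text.getD "").toList from by simp [PySem.Str.toList_lower]]
  exact (pv_foldl_flush_FNE _ _).symm

-- ===== VERDICT (by name: the statement is the Claim_ definition above) =====
theorem medication_token_set_spec : Claim_equal_medication_token_set := by
  intro text _
  unfold Spec_medication_token_set
  exact pv_main text
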